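-- pv_equiv track=rewrite | github.com/RWTH-EBC/AgentLib-FlexQuant | agentlib_flexquant/utils/config_management.py | get_module_type_matching_dict
-- ===== SOURCE A (Python) =====
-- def get_module_type_matching_dict(dictionary: dict):
--     """Creates two dictionaries, which map the modules types of the agentlib_mpc modules
--         to those of the flexquant modules. This is done by using the MODULE_TYPE_DICT
--
--     """
--     # Create dictionaries to store keys grouped by values
--     value_to_keys = {}
--     for k, v in dictionary.items():
--         if k.startswith(('agentlib_mpc.', 'agentlib_flexquant.')):
--             if v not in value_to_keys:
--                 value_to_keys[v] = {'agentlib': [], 'flex': []}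
--             if k.startswith('agentlib_mpc.'):
--                 value_to_keys[v]['agentlib'].append(k)
--             else:
--                 value_to_keys[v]['flex'].append(k)
--
--     # Create result dictionaries
--     baseline_matches = {}
--     shadow_matches = {}
--
--     for v, keys in value_to_keys.items():
--         # Check if we have both agentlib and flexibility keys for this value
--         if keys['agentlib'] and keys['flex']:
--             # Map each agentlib key to corresponding flexibility key
--             for agent_key in keys['agentlib']:
--                 for flex_key in keys['flex']:
--                     if 'baseline' in flex_key:
--                         baseline_matches[agent_key] = flex_key
--                     elif 'shadow' in flex_key:
--                         shadow_matches[agent_key] = flex_key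
--
--     return baseline_matches, shadow_matches
-- ===== SOURCE B (Python) =====
-- def get_module_type_matching_dict(dictionary: dict):
--     """Same matching as A, but the nested agent x flex loop is replaced by a
--     single scan of each flex list that precomputes the last baseline / shadow
--     key, which is then assigned to every agentlib key."""
--     groups = {}
--     for k, v in dictionary.items():
--         if k.startswith('agentlib_mpc.'):
--             groups.setdefault(v, ([], []))[0].append(k)
--         elif k.startswith('agentlib_flexquant.'):
--             groups.setdefault(v, ([], []))[1].append(k)
--
--     baseline_matches = {}
--     shadow_matches = {}
--     for agent_keys, flex_keys in groups.values():
--         if agent_keys and flex_keys: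
--             baseline = shadow = None
--             for fk in flex_keys:
--                 if 'baseline' in fk:
--                     baseline = fk
--                 elif 'shadow' in fk:
--                     shadow = fk
--             if baseline is not None:
--                 for ak in agent_keys:
--                     baseline_matches[ak] = baseline
--             if shadow is not None:
--                 for ak in agent_keys:
--                     shadow_matches[ak] = shadow
--     return baseline_matches, shadow_matches
-- ===== Notes on version B (the rewrite author's own statement) =====
-- stated objective: alternative
-- what changed: The nested agent-by-flex loop per value group is replaced by one scan of the flex list computing the last baseline and last shadow key, which are then assigned to each agentlib key; grouping uses setdefault with a pair of lists.
import Mathlib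
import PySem

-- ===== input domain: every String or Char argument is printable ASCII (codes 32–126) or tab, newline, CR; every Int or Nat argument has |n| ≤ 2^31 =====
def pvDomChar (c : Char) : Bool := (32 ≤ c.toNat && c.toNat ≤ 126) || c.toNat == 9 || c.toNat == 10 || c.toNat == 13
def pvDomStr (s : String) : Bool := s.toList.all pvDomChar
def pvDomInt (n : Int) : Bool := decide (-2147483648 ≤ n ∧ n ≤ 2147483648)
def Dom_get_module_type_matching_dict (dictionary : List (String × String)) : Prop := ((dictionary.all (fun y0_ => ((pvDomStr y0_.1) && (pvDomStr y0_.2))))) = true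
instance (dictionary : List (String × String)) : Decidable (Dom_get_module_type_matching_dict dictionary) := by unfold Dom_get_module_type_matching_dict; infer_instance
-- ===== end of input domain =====

-- One honest line: B precomputes each group's last baseline/shadow flex key in one
-- scan instead of A's nested agent x flex loop (alternative decomposition, same results).
-- ===== PORT A =====
def get_module_type_matching_dict (dictionary : List (String × String)) : (List (String × String)) × (List (String × String)) :=
  let d := PySem.Dict.ofList dictionary
  let value_to_keys : PySem.Dict String (List String × List String) :=
    d.items.foldl (fun vtk kv =>
      let k := kv.1
      let v := kv.2
      if PySem.Str.startswith k "agentlib_mpc." || PySem.Str.startswith k "agentlib_flexquant." then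
        let vtk := if vtk.contains v then vtk else vtk.insert v ([], [])
        if PySem.Str.startswith k "agentlib_mpc." then
          vtk.insert v (let g := vtk.getD v ([], []); (g.1 ++ [k], g.2))
        else
          vtk.insert v (let g := vtk.getD v ([], []); (g.1, g.2 ++ [k]))
      else vtk) PySem.Dict.empty
  let res : PySem.Dict String String × PySem.Dict String String :=
    value_to_keys.items.foldl (fun bs p =>
      let keys := p.2
      if keys.1 ≠ [] ∧ keys.2 ≠ [] then
        keys.1.foldl (fun bs ak =>
          keys.2.foldl (fun bs fk =>
            if PySem.Str.isIn "baseline" fk then (bs.1.insert ak fk, bs.2)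
            else if PySem.Str.isIn "shadow" fk then (bs.1, bs.2.insert ak fk)
            else bs) bs) bs
      else bs) (PySem.Dict.empty, PySem.Dict.empty)
  (res.1.items, res.2.items)

-- ===== PORT B =====
def get_module_type_matching_dict_alt (dictionary : List (String × String)) : (List (String × String)) × (List (String × String)) :=
  let d := PySem.Dict.ofList dictionary
  let groups : PySem.Dict String (List String × List String) :=
    d.items.foldl (fun g kv =>
      if PySem.Str.startswith kv.1 "agentlib_mpc." then
        g.modify kv.2 ([], []) (fun p => (p.1 ++ [kv.1], p.2))
      else if PySem.Str.startswith kv.1 "agentlib_flexquant." then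
        g.modify kv.2 ([], []) (fun p => (p.1, p.2 ++ [kv.1]))
      else g) PySem.Dict.empty
  let res : PySem.Dict String String × PySem.Dict String String :=
    groups.values.foldl (fun bs keys =>
      if !keys.1.isEmpty && !keys.2.isEmpty then
        let bsh := keys.2.foldl (fun (bsh : Option String × Option String) fk =>
            if PySem.Str.isIn "baseline" fk then (some fk, bsh.2)
            else if PySem.Str.isIn "shadow" fk then (bsh.1, some fk)
            else bsh) (none, none)
        let bm := match bsh.1 with
          | some b => keys.1.foldl (fun m ak => m.insert ak b) bs.1
          | none => bs.1
        let sm := match bsh.2 with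
          | some sh => keys.1.foldl (fun m ak => m.insert ak sh) bs.2
          | none => bs.2
        (bm, sm)
      else bs) (PySem.Dict.empty, PySem.Dict.empty)
  (res.1.items, res.2.items)

-- ===== PRECONDITION & SPEC =====
def Spec_get_module_type_matching_dict (dictionary : List (String × String)) (out : (List (String × String)) × (List (String × String))) : Prop := out = get_module_type_matching_dict_alt dictionary
instance (dictionary : List (String × String)) (out : (List (String × String)) × (List (String × String))) : Decidable (Spec_get_module_type_matching_dict dictionary out) := by unfold Spec_get_module_type_matching_dict; infer_instance

-- ===== CLAIM (what is proved, stated in full; the proofs are below) =====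
def Claim_equal_get_module_type_matching_dict : Prop := ∀ (dictionary : List (String × String)), Dom_get_module_type_matching_dict dictionary → Spec_get_module_type_matching_dict dictionary (get_module_type_matching_dict dictionary)

-- ===== LEMMAS AND PROOFS =====

-- Phase 1: A's membership-test-then-insert grouping step equals B's setdefault/modify step.
theorem pv_group_step_eq (vtk : PySem.Dict String (List String × List String))
    (v : String) (f : List String × List String → List String × List String) :
    (let vtk' := if vtk.contains v then vtk else vtk.insert v ([], []);
     vtk'.insert v (f (vtk'.getD v ([], [])))) = vtk.modify v ([], []) f := by
  have hmod : vtk.modify v ([], []) f = vtk.insert v (f (vtk.getD v ([], []))) :=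
    PySem.Dict.ext_iff.mpr rfl
  by_cases h : vtk.contains v = true
  · simp [h, hmod]
  · rw [Bool.not_eq_true] at h
    rw [hmod]
    simp only [h, Bool.false_eq_true, if_false]
    rw [PySem.Dict.getD_insert_self, PySem.Dict.insert_insert_self,
        PySem.Dict.getD_of_not_contains (h := h)]

-- the two grouping fold functions agree pointwise
theorem pv_group_fun_eq :
    (fun (vtk : PySem.Dict String (List String × List String)) (kv : String × String) =>
      if PySem.Str.startswith kv.1 "agentlib_mpc." || PySem.Str.startswith kv.1 "agentlib_flexquant." then
        let vtk' := if vtk.contains kv.2 then vtk else vtk.insert kv.2 ([], []);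
        if PySem.Str.startswith kv.1 "agentlib_mpc." then
          vtk'.insert kv.2 (let g := vtk'.getD kv.2 ([], []); (g.1 ++ [kv.1], g.2))
        else
          vtk'.insert kv.2 (let g := vtk'.getD kv.2 ([], []); (g.1, g.2 ++ [kv.1]))
      else vtk)
    = (fun (g : PySem.Dict String (List String × List String)) (kv : String × String) =>
      if PySem.Str.startswith kv.1 "agentlib_mpc." then
        g.modify kv.2 ([], []) (fun p => (p.1 ++ [kv.1], p.2))
      else if PySem.Str.startswith kv.1 "agentlib_flexquant." then
        g.modify kv.2 ([], []) (fun p => (p.1, p.2 ++ [kv.1]))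
      else g) := by
  funext vtk kv
  by_cases h1 : PySem.Str.startswith kv.1 "agentlib_mpc." = true
  · simp only [h1, Bool.true_or, if_true]
    exact pv_group_step_eq vtk kv.2 (fun p => (p.1 ++ [kv.1], p.2))
  · rw [Bool.not_eq_true] at h1
    by_cases h2 : PySem.Str.startswith kv.1 "agentlib_flexquant." = true
    · simp only [h1, h2, Bool.false_or, if_true, Bool.false_eq_true, if_false]
      exact pv_group_step_eq vtk kv.2 (fun p => (p.1, p.2 ++ [kv.1]))
    · rw [Bool.not_eq_true] at h2
      simp only [h1, h2, Bool.false_or, Bool.false_eq_true, if_false]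

-- Phase 2 abbreviations (proof-only).
def pvScan (fs : List String) (st : Option String × Option String) : Option String × Option String :=
  fs.foldl (fun bsh fk =>
    if PySem.Str.isIn "baseline" fk then (some fk, bsh.2)
    else if PySem.Str.isIn "shadow" fk then (bsh.1, some fk)
    else bsh) st

def pvApp (o : Option String) (ak : String) (m : PySem.Dict String String) : PySem.Dict String String :=
  match o with
  | some x => m.insert ak x
  | none => m

def pvAppAll (o : Option String) (as_ : List String) (m : PySem.Dict String String) : PySem.Dict String String :=
  match o with
  | some x => as_.foldl (fun m ak => m.insert ak x) m
  | none => m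

theorem pv_app_insert (o : Option String) (ak x : String) (m : PySem.Dict String String) :
    (pvApp o ak m).insert ak x = m.insert ak x := by
  cases o with
  | none => rfl
  | some y => exact PySem.Dict.insert_insert_self m ak y x

theorem pv_appAll_cons (o : Option String) (a : String) (as_ : List String) (m : PySem.Dict String String) :
    pvAppAll o (a :: as_) m = pvAppAll o as_ (pvApp o a m) := by
  cases o <;> rfl

-- A's inner flex loop for one agent key, from a state already of the pvApp shape.
theorem pv_inner_eq (fs : List String) (ak : String) :
    ∀ (b0 s0 : Option String) (bm sm : PySem.Dict String String),
    fs.foldl (fun bs fk =>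
        if PySem.Str.isIn "baseline" fk then (bs.1.insert ak fk, bs.2)
        else if PySem.Str.isIn "shadow" fk then (bs.1, bs.2.insert ak fk)
        else bs) (pvApp b0 ak bm, pvApp s0 ak sm)
      = (pvApp (pvScan fs (b0, s0)).1 ak bm, pvApp (pvScan fs (b0, s0)).2 ak sm) := by
  induction fs with
  | nil => intro b0 s0 bm sm; rfl
  | cons fk fs ih =>
    intro b0 s0 bm sm
    by_cases hb : PySem.Str.isIn "baseline" fk = true
    · simp only [List.foldl_cons, pvScan, hb, if_true]
      have h : ((pvApp b0 ak bm).insert ak fk, pvApp s0 ak sm)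
          = (pvApp (some fk) ak bm, pvApp s0 ak sm) := by rw [pv_app_insert]; rfl
      rw [h]
      exact ih (some fk) s0 bm sm
    · rw [Bool.not_eq_true] at hb
      by_cases hs : PySem.Str.isIn "shadow" fk = true
      · simp only [List.foldl_cons, pvScan, hb, hs, if_true, Bool.false_eq_true, if_false]
        have h : (pvApp b0 ak bm, (pvApp s0 ak sm).insert ak fk)
            = (pvApp b0 ak bm, pvApp (some fk) ak sm) := by rw [pv_app_insert]; rfl
        rw [h]
        exact ih b0 (some fk) bm sm
      · rw [Bool.not_eq_true] at hs
        simp only [List.foldl_cons, pvScan, hb, hs, Bool.false_eq_true, if_false]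
        exact ih b0 s0 bm sm

-- A's agent x flex double loop equals: scan once, then assign to every agent key.
theorem pv_double_eq (as_ fs : List String) :
    ∀ (bm sm : PySem.Dict String String),
    as_.foldl (fun bs ak =>
        fs.foldl (fun bs fk =>
          if PySem.Str.isIn "baseline" fk then (bs.1.insert ak fk, bs.2)
          else if PySem.Str.isIn "shadow" fk then (bs.1, bs.2.insert ak fk)
          else bs) bs) (bm, sm)
      = (pvAppAll (pvScan fs (none, none)).1 as_ bm, pvAppAll (pvScan fs (none, none)).2 as_ sm) := by
  induction as_ with
  | nil =>
    intro bm sm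
    cases h1 : (pvScan fs (none, none)).1 <;> cases h2 : (pvScan fs (none, none)).2 <;>
      simp [pvAppAll]
  | cons a as_ ih =>
    intro bm sm
    simp only [List.foldl_cons]
    have h0 : (bm, sm) = ((pvApp none a bm : PySem.Dict String String), (pvApp none a sm : PySem.Dict String String)) := rfl
    rw [h0, pv_inner_eq fs a none none bm sm, ih, pv_appAll_cons, pv_appAll_cons]

-- one step of phase 2: A's per-group step equals B's per-group step.
theorem pv_phase2_step_eq (bs : PySem.Dict String String × PySem.Dict String String)
    (keys : List String × List String) :
    (if keys.1 ≠ [] ∧ keys.2 ≠ [] then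
      keys.1.foldl (fun bs ak =>
        keys.2.foldl (fun bs fk =>
          if PySem.Str.isIn "baseline" fk then (bs.1.insert ak fk, bs.2)
          else if PySem.Str.isIn "shadow" fk then (bs.1, bs.2.insert ak fk)
          else bs) bs) bs
    else bs)
    = (if !keys.1.isEmpty && !keys.2.isEmpty then
        (match (List.foldl (fun (bsh : Option String × Option String) fk =>
              if PySem.Str.isIn "baseline" fk then (some fk, bsh.2)
              else if PySem.Str.isIn "shadow" fk then (bsh.1, some fk)
              else bsh) (none, none) keys.2).1 with
          | some b => List.foldl (fun m ak => m.insert ak b) bs.1 keys.1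
          | none => bs.1,
         match (List.foldl (fun (bsh : Option String × Option String) fk =>
              if PySem.Str.isIn "baseline" fk then (some fk, bsh.2)
              else if PySem.Str.isIn "shadow" fk then (bsh.1, some fk)
              else bsh) (none, none) keys.2).2 with
          | some sh => List.foldl (fun m ak => m.insert ak sh) bs.2 keys.1
          | none => bs.2)
      else bs) := by
  by_cases h : keys.1 ≠ [] ∧ keys.2 ≠ []
  · have hb : (!keys.1.isEmpty && !keys.2.isEmpty) = true := by
      simp [h.1, h.2]
    rw [if_pos h, if_pos hb]
    have h2 := pv_double_eq keys.1 keys.2 bs.1 bs.2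
    simp only [Prod.mk.eta] at h2
    rw [h2]
    rfl
  · have hb : (!keys.1.isEmpty && !keys.2.isEmpty) = false := by
      rcases not_and_or.mp h with h1 | h1 <;> simp only [not_ne_iff] at h1 <;> simp [h1]
    rw [if_neg h, if_neg (by simp [hb])]

-- the whole phase-2 folds agree
theorem pv_phase2_fold_eq (l : List (String × (List String × List String)))
    (bs : PySem.Dict String String × PySem.Dict String String) :
    l.foldl (fun bs p =>
      if p.2.1 ≠ [] ∧ p.2.2 ≠ [] then
        p.2.1.foldl (fun bs ak =>
          p.2.2.foldl (fun bs fk =>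
            if PySem.Str.isIn "baseline" fk then (bs.1.insert ak fk, bs.2)
            else if PySem.Str.isIn "shadow" fk then (bs.1, bs.2.insert ak fk)
            else bs) bs) bs
      else bs) bs
    = l.foldl (fun bs p =>
      if !p.2.1.isEmpty && !p.2.2.isEmpty then
        (match (List.foldl (fun (bsh : Option String × Option String) fk =>
              if PySem.Str.isIn "baseline" fk then (some fk, bsh.2)
              else if PySem.Str.isIn "shadow" fk then (bsh.1, some fk)
              else bsh) (none, none) p.2.2).1 with
          | some b => List.foldl (fun m ak => m.insert ak b) bs.1 p.2.1
          | none => bs.1,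
         match (List.foldl (fun (bsh : Option String × Option String) fk =>
              if PySem.Str.isIn "baseline" fk then (some fk, bsh.2)
              else if PySem.Str.isIn "shadow" fk then (bsh.1, some fk)
              else bsh) (none, none) p.2.2).2 with
          | some sh => List.foldl (fun m ak => m.insert ak sh) bs.2 p.2.1
          | none => bs.2)
      else bs) bs := by
  induction l generalizing bs with
  | nil => rfl
  | cons p l ih =>
    simp only [List.foldl_cons]
    rw [pv_phase2_step_eq bs p.2]
    exact ih _

-- ===== VERDICT (by name: the statement is the Claim_ definition above) =====
theorem get_module_type_matching_dict_spec : Claim_equal_get_module_type_matching_dict := by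
  intro dictionary _
  unfold Spec_get_module_type_matching_dict
  unfold get_module_type_matching_dict get_module_type_matching_dict_alt
  rw [pv_group_fun_eq]
  simp only [PySem.Dict.values, List.foldl_map]
  rw [pv_phase2_fold_eq]
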